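-- pv_equiv track=rewrite | github.com/bayesgroup/code_transformers | cc/main/src/scripts/generate_tree_masks.py | separate_rel_mask
-- ===== SOURCE A (Python) =====
-- def separate_rel_mask(up_rels, down_rels, max_len):
--     """
--     Separate the mask by a sliding window to keep each dp at length max_len.
--     For the masks, for each row, since we want the information to be relative
--     to whatever is being predicted (ie. input_seq[i+1]), we are shifting
--     everything by 1. Thus, the length of each mask will be len(seq) - 1.
--     """
--     if len(up_rels) <= max_len:
--         ret = []
--         for i in range(1, len(up_rels)):
--             sub = [str(up_rels[i][j]) + '|' + str(down_rels[i][j]) for j in range(i)]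
--             ret.append(" ".join(sub))
--         return [ret]
--
--     half_len = int(max_len / 2)
--     rel_mask_aug = []
--     ret = []
--     for i in range(1, max_len):
--         sub = [str(up_rels[i][j]) + '|' + str(down_rels[i][j]) for j in range(i)]
--         ret.append(" ".join(sub))
--     rel_mask_aug.append(ret)
--
--     i = half_len
--     while i < len(up_rels) - max_len:
--         ret = []
--         for k in range(i + 1, i + max_len):
--             sub = []
--             for j in range(i, k):
--                 sub.append(str(up_rels[k][j]) + '|' + str(down_rels[k][j]))
--             ret.append(" ".join(sub))
--         rel_mask_aug.append(ret)
--         i += half_len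
--     ret = []
--     for i in range(len(up_rels)-max_len+1, len(up_rels)):
--         sub = [str(up_rels[i][j]) + '|' + str(down_rels[i][j]) for j in range(len(up_rels)-max_len, i)]
--         ret.append(" ".join(sub))
--     rel_mask_aug.append(ret)
--
--     return rel_mask_aug
-- ===== SOURCE B (Python) =====
-- def separate_rel_mask(up_rels, down_rels, max_len):
--     n = len(up_rels)
--     # Render every "up|down" cell string once, then assemble each window
--     # block by slicing the pre-rendered rows.
--     cells = [[str(u) + '|' + str(d) for u, d in zip(up_rels[r], down_rels[r])]
--              for r in range(n)]
--     if n <= max_len: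
--         specs = [(1, n, 0)]
--     else:
--         half = int(max_len / 2)
--         specs = [(1, max_len, 0)]
--         for i in range(half, n - max_len, half):
--             specs.append((i + 1, i + max_len, i))
--         specs.append((n - max_len + 1, n, n - max_len))
--     return [[" ".join(cells[r][c:r]) for r in range(lo, hi)]
--             for lo, hi, c in specs]
-- ===== Notes on version B (the rewrite author's own statement) =====
-- stated objective: simpler
-- what changed: B first renders every up|down cell string once, then builds a list of window descriptors (row range, column start) covering the three cases, and assembles all blocks with one uniform pass that joins slices of the pre-rendered rows, instead of A's four separate nested string-building loops.
import Mathlib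
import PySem

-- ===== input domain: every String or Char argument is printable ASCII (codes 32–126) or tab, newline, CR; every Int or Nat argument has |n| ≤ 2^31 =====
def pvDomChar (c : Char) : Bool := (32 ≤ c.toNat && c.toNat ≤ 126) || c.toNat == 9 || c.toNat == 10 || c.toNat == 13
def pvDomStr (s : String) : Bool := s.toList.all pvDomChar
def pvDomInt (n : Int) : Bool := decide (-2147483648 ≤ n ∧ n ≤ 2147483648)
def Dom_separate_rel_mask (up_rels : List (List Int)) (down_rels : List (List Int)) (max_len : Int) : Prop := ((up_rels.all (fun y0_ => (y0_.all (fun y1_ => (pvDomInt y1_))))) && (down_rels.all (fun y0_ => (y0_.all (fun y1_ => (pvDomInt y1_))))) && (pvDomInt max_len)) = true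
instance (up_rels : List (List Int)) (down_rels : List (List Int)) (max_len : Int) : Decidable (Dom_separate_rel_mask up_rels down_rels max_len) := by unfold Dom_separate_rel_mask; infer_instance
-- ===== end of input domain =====

-- B renders every "up|down" cell string once and assembles each sliding-window
-- block by slicing the pre-rendered rows of a window-descriptor list (objective: simpler decomposition).

-- ===== PORT A =====
-- str(up_rels[k][j]) + '|' + str(down_rels[k][j])  (indices valid under Pre_)
def pvEntryA (up down : List (List Int)) (k j : Int) : String :=
  PySem.Int.toStr (PySem.List.pyGetD (PySem.List.pyGetD up k []) j 0) ++ "|" ++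
    PySem.Int.toStr (PySem.List.pyGetD (PySem.List.pyGetD down k []) j 0)

-- " ".join(str(up[k][j])+'|'+str(down[k][j]) for j in range(c, k))
def pvRowA (up down : List (List Int)) (c k : Int) : String :=
  PySem.Str.join " " ((PySem.List.pyRange c k 1).map (fun j => pvEntryA up down k j))

-- the `while i < len(up_rels) - max_len` loop of A (fuel bounds the iteration count;
-- under Pre_ half ≥ 1 so the fuel is never exhausted)
def pvMidA (up down : List (List Int)) (max_len lim half : Int) : Nat → Int → List (List String)
  | 0, _ => []
  | fuel+1, i =>
    if i < lim then
      ((PySem.List.pyRange (i+1) (i+max_len) 1).map (fun k => pvRowA up down i k)) ::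
        pvMidA up down max_len lim half fuel (i + half)
    else []

def separate_rel_mask (up_rels : List (List Int)) (down_rels : List (List Int)) (max_len : Int) : List (List String) :=
  let n : Int := up_rels.length
  if n ≤ max_len then
    [(PySem.List.pyRange 1 n 1).map (fun i => pvRowA up_rels down_rels 0 i)]
  else
    let half : Int := max_len.tdiv 2   -- int(max_len / 2) truncates toward zero
    let first := (PySem.List.pyRange 1 max_len 1).map (fun i => pvRowA up_rels down_rels 0 i)
    let mid := pvMidA up_rels down_rels max_len (n - max_len) half ((n - max_len).toNat + 1) half
    let last := (PySem.List.pyRange (n - max_len + 1) n 1).map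
      (fun i => pvRowA up_rels down_rels (n - max_len) i)
    first :: (mid ++ [last])

-- ===== PORT B =====
-- cells[r] = [str(u)+'|'+str(d) for u,d in zip(up_rels[r], down_rels[r])]
def pvCells (up down : List (List Int)) : List (List String) :=
  (PySem.List.pyRange 0 up.length 1).map (fun r =>
    ((PySem.List.pyGetD up r []).zip (PySem.List.pyGetD down r [])).map
      (fun p => PySem.Int.toStr p.1 ++ "|" ++ PySem.Int.toStr p.2))

-- window-descriptor accumulation of B's while loop: (lo, hi, col_start)
def pvMidSpecs (max_len lim half : Int) : Nat → Int → List (Int × Int × Int)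
  | 0, _ => []
  | fuel+1, i =>
    if i < lim then (i + 1, i + max_len, i) :: pvMidSpecs max_len lim half fuel (i + half)
    else []

-- [" ".join(cells[r][c:r]) for r in range(lo, hi)]
def pvRenderSpec (cells : List (List String)) (s : Int × Int × Int) : List String :=
  (PySem.List.pyRange s.1 s.2.1 1).map (fun r =>
    PySem.Str.join " " (PySem.List.slice (PySem.List.pyGetD cells r []) (some s.2.2) (some r)))

def separate_rel_mask_alt (up_rels : List (List Int)) (down_rels : List (List Int)) (max_len : Int) : List (List String) :=
  let n : Int := up_rels.length
  let cells := pvCells up_rels down_rels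
  let specs : List (Int × Int × Int) :=
    if n ≤ max_len then [(1, n, 0)]
    else
      let half : Int := max_len.tdiv 2
      (1, max_len, 0) ::
        (pvMidSpecs max_len (n - max_len) half ((n - max_len).toNat + 1) half ++
          [(n - max_len + 1, n, n - max_len)])
  specs.map (pvRenderSpec cells)

-- ===== PRECONDITION & SPEC =====
-- Pre_ is exactly the set of inputs on which A returns: every row r that A reads must
-- have length ≥ r in both matrices, down_rels must have at least as many rows as
-- up_rels, and (unless the short branch applies) max_len ≥ 2 — for max_len ≤ 1 the
-- long branch's `while` loop of A never terminates.
def Pre_separate_rel_mask (up_rels : List (List Int)) (down_rels : List (List Int)) (max_len : Int) : Prop :=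
  up_rels.length ≤ down_rels.length ∧
  ((List.range up_rels.length).all (fun r =>
    decide (r ≤ (up_rels.getD r []).length) && decide (r ≤ (down_rels.getD r []).length))) = true ∧
  ((up_rels.length : Int) ≤ max_len ∨ 2 ≤ max_len)

instance (up_rels : List (List Int)) (down_rels : List (List Int)) (max_len : Int) : Decidable (Pre_separate_rel_mask up_rels down_rels max_len) := by
  unfold Pre_separate_rel_mask; infer_instance

def pvWitness_separate_rel_mask : List (List Int) × List (List Int) × Int :=
  ([[], [1], [2, 3], [4, 5, 6], [7, 8, 9, 0]],
   [[], [5], [6, 7], [8, 9, 0], [1, 2, 3, 4]], 3)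

def Spec_separate_rel_mask (up_rels : List (List Int)) (down_rels : List (List Int)) (max_len : Int) (out : List (List String)) : Prop := out = separate_rel_mask_alt up_rels down_rels max_len
instance (up_rels : List (List Int)) (down_rels : List (List Int)) (max_len : Int) (out : List (List String)) : Decidable (Spec_separate_rel_mask up_rels down_rels max_len out) := by unfold Spec_separate_rel_mask; infer_instance

-- ===== CLAIM (what is proved, stated in full; the proofs are below) =====
def Claim_equal_separate_rel_mask : Prop := ∀ (up_rels : List (List Int)) (down_rels : List (List Int)) (max_len : Int), Dom_separate_rel_mask up_rels down_rels max_len → Pre_separate_rel_mask up_rels down_rels max_len → Spec_separate_rel_mask up_rels down_rels max_len (separate_rel_mask up_rels down_rels max_len)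

-- ===== LEMMAS AND PROOFS =====

-- Nat-level core: a range-comprehension row of A equals a slice of a pre-rendered row.
theorem pvRow_core (urow drow : List Int) (cn rn : Nat)
    (hu : rn ≤ urow.length) (hd : rn ≤ drow.length) (hc : cn ≤ rn) :
    (PySem.List.pyRange (cn : Int) (rn : Int) 1).map
        (fun j => PySem.Int.toStr (PySem.List.pyGetD urow j 0) ++ "|" ++
          PySem.Int.toStr (PySem.List.pyGetD drow j 0))
      = (((urow.zip drow).map
            (fun p => PySem.Int.toStr p.1 ++ "|" ++ PySem.Int.toStr p.2)).drop cn).take (rn - cn) := by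
  have hlen : (((rn : Int)) - ((cn : Int))).toNat = rn - cn := by omega
  rw [PySem.List.pyRange_one]
  apply List.ext_getElem
  · simp [hlen]
    omega
  · intro i h1 h2
    simp only [List.getElem_map, List.getElem_range, List.getElem_take, List.getElem_drop,
      List.getElem_zip]
    have hi : cn + i < rn := by
      simp [hlen] at h1; omega
    have h3 : ((cn : Int) + (i : Int)) = ((cn + i : Nat) : Int) := by push_cast; ring
    rw [h3, PySem.List.pyGetD_natCast, PySem.List.pyGetD_natCast]
    rw [List.getD_eq_getElem urow 0 (by omega), List.getD_eq_getElem drow 0 (by omega)]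

-- A window block of A equals B's rendering of the same window descriptor.
theorem pvBlock (up down : List (List Int)) (lo hi c : Int)
    (hc0 : 0 ≤ c) (hclo : c ≤ lo) (hhi : hi ≤ (up.length : Int))
    (hrows : ∀ r : Nat, r < up.length →
      r ≤ (up.getD r []).length ∧ r ≤ (down.getD r []).length) :
    (PySem.List.pyRange lo hi 1).map (fun i => pvRowA up down c i)
      = pvRenderSpec (pvCells up down) (lo, hi, c) := by
  unfold pvRenderSpec
  apply List.map_congr_left
  intro r hr
  rw [PySem.List.mem_pyRange_one] at hr
  obtain ⟨hr1, hr2⟩ := hr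
  have h0r : 0 ≤ r := le_trans hc0 (le_trans hclo hr1)
  obtain ⟨rn, rfl⟩ : ∃ rn : Nat, r = (rn : Int) := ⟨r.toNat, (Int.toNat_of_nonneg h0r).symm⟩
  obtain ⟨cn, rfl⟩ : ∃ cn : Nat, c = (cn : Int) := ⟨c.toNat, (Int.toNat_of_nonneg hc0).symm⟩
  have hrn : rn < up.length := by exact_mod_cast lt_of_lt_of_le hr2 hhi
  have hcr : cn ≤ rn := by exact_mod_cast le_trans hclo hr1
  obtain ⟨hu, hd⟩ := hrows rn hrn
  unfold pvCells
  rw [PySem.List.pyGetD_map_pyRange_of_nonneg _ _ _ _ (by positivity) (by exact_mod_cast hrn)]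
  rw [PySem.List.slice_natCast]
  unfold pvRowA pvEntryA
  simp only [PySem.List.pyGetD_natCast]
  congr 1
  exact pvRow_core (up.getD rn []) (down.getD rn []) cn rn hu hd hcr

-- the two while loops produce block-by-block equal output
theorem pvMid_eq (up down : List (List Int)) (ml lim half : Int)
    (hlim : lim ≤ (up.length : Int) - ml)
    (hrows : ∀ r : Nat, r < up.length →
      r ≤ (up.getD r []).length ∧ r ≤ (down.getD r []).length)
    (fuel : Nat) :
    ∀ i : Int, 0 ≤ i → 0 ≤ half →
      pvMidA up down ml lim half fuel i
        = (pvMidSpecs ml lim half fuel i).map (pvRenderSpec (pvCells up down)) := by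
  induction fuel with
  | zero => intro i _ _; simp [pvMidA, pvMidSpecs]
  | succ f ih =>
    intro i hi hh
    rw [pvMidA, pvMidSpecs]
    split_ifs with h
    · simp only [List.map_cons]
      rw [ih (i + half) (by omega) hh]
      congr 1
      exact pvBlock up down (i + 1) (i + ml) i hi (by omega) (by omega) hrows
    · simp

theorem separate_rel_mask_spec : Claim_equal_separate_rel_mask := by
  intro up down ml _hDom hPre
  obtain ⟨hlen, hrows', hml⟩ := hPre
  have hrows : ∀ r : Nat, r < up.length →
      r ≤ (up.getD r []).length ∧ r ≤ (down.getD r []).length := by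
    intro r hr
    simp only [List.all_eq_true, List.mem_range, Bool.and_eq_true, decide_eq_true_eq] at hrows'
    exact hrows' r hr
  unfold Spec_separate_rel_mask separate_rel_mask separate_rel_mask_alt
  simp only []
  split_ifs with h
  · rw [List.map_cons, List.map_nil]
    congr 1
    exact pvBlock up down 1 (up.length : Int) 0 le_rfl (by omega) le_rfl hrows
  · have h2 : 2 ≤ ml := by
      rcases hml with h1 | h2
      · exact absurd h1 h
      · exact h2
    have hmln : ml < (up.length : Int) := by omega
    have hhalf : 1 ≤ ml.tdiv 2 := by
      rw [Int.tdiv_eq_ediv_of_nonneg (by omega)]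
      omega
    rw [List.map_cons, List.map_append, List.map_singleton]
    congr 1
    · exact pvBlock up down 1 ml 0 le_rfl (by omega) (by omega) hrows
    congr 1
    · exact pvMid_eq up down ml ((up.length : Int) - ml) (ml.tdiv 2) (by omega) hrows
        _ (ml.tdiv 2) (by omega) (by omega)
    · congr 1
      exact pvBlock up down ((up.length : Int) - ml + 1) (up.length : Int) ((up.length : Int) - ml)
        (by omega) (by omega) le_rfl hrows
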